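-- pv_equiv track=rewrite | github.com/hsvpy/AdventOfCode2020 | drew_day06.py | part_two
-- ===== SOURCE A (Python) =====
-- from typing import List
--
-- def part_two(puzzle_input: List[str]) -> int:
--     """part 2: sum of questions *everyone* answered in a group"""
--     score = 0
--     active_group = set()
--     # use this sentinel flag so we can set the first line to be
--     # our comparison value
--     new = True
--     for line in puzzle_input:
--         if not line:
--             score += len(active_group)
--             active_group = set()
--             new = True
--             continue
--         if not new:
--             active_group &= set(line)
--         else:
--             new = False
--             active_group = set(line)
--     if active_group:
--         score += len(active_group)
--     return score
-- ===== SOURCE B (Python) =====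
-- from typing import List
--
--
-- def part_two(puzzle_input: List[str]) -> int:
--     """part 2: sum of questions *everyone* answered in a group"""
--     # Phase 1: split the input into non-empty groups of lines.
--     groups = []
--     current = []
--     for line in puzzle_input:
--         if line:
--             current.append(line)
--         elif current:
--             groups.append(current)
--             current = []
--     if current:
--         groups.append(current)
--     # Phase 2: sum the sizes of each group's common-answer set.
--     total = 0
--     for g in groups:
--         common = set(g[0])
--         for l in g[1:]:
--             common &= set(l)
--         total += len(common)
--     return total
-- ===== Notes on version B (the rewrite author's own statement) =====
-- stated objective: idiomatic
-- what changed: Replaced the one-pass sentinel-flag loop with a two-phase decomposition: first split the input into non-empty groups at blank lines, then sum the size of each group's character-set intersection.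
import Mathlib
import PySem

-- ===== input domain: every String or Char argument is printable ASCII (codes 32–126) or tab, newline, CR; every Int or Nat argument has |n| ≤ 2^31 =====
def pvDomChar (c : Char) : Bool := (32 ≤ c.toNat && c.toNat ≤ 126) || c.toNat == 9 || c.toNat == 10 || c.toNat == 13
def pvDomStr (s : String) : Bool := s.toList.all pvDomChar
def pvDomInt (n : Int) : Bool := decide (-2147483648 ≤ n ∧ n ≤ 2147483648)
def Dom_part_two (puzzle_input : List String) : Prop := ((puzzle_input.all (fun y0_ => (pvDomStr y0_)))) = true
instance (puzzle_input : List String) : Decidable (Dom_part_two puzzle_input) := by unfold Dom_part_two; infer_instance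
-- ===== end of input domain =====

-- B replaces A's one-pass sentinel-flag loop by a two-phase decomposition:
-- split into non-empty groups at blank lines, then sum each group's intersection size.

-- ===== PORT A =====
-- loop body of A: state is (score, active_group, new)
def aStep (st : Int × PySem.Set Char × Bool) (line : String) : Int × PySem.Set Char × Bool :=
  if line.toList = [] then
    (st.1 + PySem.Set.len st.2.1, PySem.Set.empty, true)
  else if st.2.2 = false then
    (st.1, PySem.Set.inter st.2.1 (PySem.Set.ofList line.toList), st.2.2)
  else
    (st.1, PySem.Set.ofList line.toList, false)

def part_two (puzzle_input : List String) : Int :=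
  let st := puzzle_input.foldl aStep (0, PySem.Set.empty, true)
  -- final `if active_group: score += len(active_group)`
  if st.2.1 ≠ [] then st.1 + PySem.Set.len st.2.1 else st.1

-- ===== PORT B =====
-- phase-1 loop body of Source B: state is (groups, current)
def bStep (st : List (List String) × List String) (line : String) : List (List String) × List String :=
  if line.toList ≠ [] then (st.1, st.2 ++ [line])
  else if st.2 ≠ [] then (st.1 ++ [st.2], ([] : List String))
  else st

def pvGroups (puzzle_input : List String) : List (List String) :=
  let st := puzzle_input.foldl bStep ([], [])
  -- final `if current: groups.append(current)`
  if st.2 ≠ [] then st.1 ++ [st.2] else st.1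

-- phase-2 inner loop of Source B: common = set(g[0]); for l in g[1:]: common &= set(l)
def pvCommon (g : List String) : PySem.Set Char :=
  match g with
  | [] => PySem.Set.empty
  | l :: rest =>
      rest.foldl (fun s l' => PySem.Set.inter s (PySem.Set.ofList l'.toList))
        (PySem.Set.ofList l.toList)

def part_two_alt (puzzle_input : List String) : Int :=
  (pvGroups puzzle_input).foldl (fun total g => total + PySem.Set.len (pvCommon g)) 0

-- ===== PRECONDITION & SPEC =====
def Spec_part_two (puzzle_input : List String) (out : Int) : Prop := out = part_two_alt puzzle_input
instance (puzzle_input : List String) (out : Int) : Decidable (Spec_part_two puzzle_input out) := by unfold Spec_part_two; infer_instance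

-- ===== CLAIM (what is proved, stated in full; the proofs are below) =====
def Claim_equal_part_two : Prop := ∀ (puzzle_input : List String), Dom_part_two puzzle_input → Spec_part_two puzzle_input (part_two puzzle_input)

-- ===== LEMMAS AND PROOFS =====

def finishA (st : Int × PySem.Set Char × Bool) : Int :=
  if st.2.1 ≠ [] then st.1 + PySem.Set.len st.2.1 else st.1

def finishB (st : List (List String) × List String) : List (List String) :=
  if st.2 ≠ [] then st.1 ++ [st.2] else st.1

def sumLens (gs : List (List String)) (x : Int) : Int :=
  gs.foldl (fun total g => total + PySem.Set.len (pvCommon g)) x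

lemma sumLens_append (gs hs : List (List String)) (x : Int) :
    sumLens (gs ++ hs) x = sumLens hs (sumLens gs x) := by
  simp [sumLens, List.foldl_append]

-- the active set A carries for the currently open group
def actOf (current : List String) : PySem.Set Char :=
  if current = [] then PySem.Set.empty else pvCommon current

lemma pvCommon_append (cur : List String) (line : String) (h : cur ≠ []) :
    pvCommon (cur ++ [line]) =
      PySem.Set.inter (pvCommon cur) (PySem.Set.ofList line.toList) := by
  match cur with
  | [] => exact absurd rfl h
  | l :: rest => simp [pvCommon, List.foldl_append]

-- B's group accumulator factors out of the fold
lemma bfold_factor (lines : List String) (gs : List (List String)) (cur : List String) :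
    lines.foldl bStep (gs, cur) =
      (gs ++ (lines.foldl bStep ([], cur)).1, (lines.foldl bStep ([], cur)).2) := by
  induction lines generalizing gs cur with
  | nil => simp
  | cons line rest ih =>
      simp only [List.foldl_cons]
      by_cases hl : line.toList = []
      · by_cases hc : cur = []
        · have h1 : bStep (gs, cur) line = (gs, cur) := by simp [bStep, hl, hc]
          have h2 : bStep ([], cur) line = ([], cur) := by simp [bStep, hl, hc]
          rw [h1, h2, ih]
        · have h1 : bStep (gs, cur) line = (gs ++ [cur], []) := by simp [bStep, hl, hc]
          have h2 : bStep ([], cur) line = ([cur], []) := by simp [bStep, hl, hc]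
          rw [h1, h2, ih (gs ++ [cur]) [], ih [cur] []]
          simp
      · have h1 : bStep (gs, cur) line = (gs, cur ++ [line]) := by simp [bStep, hl]
        have h2 : bStep ([], cur) line = ([], cur ++ [line]) := by simp [bStep, hl]
        rw [h1, h2, ih]

-- core invariant: running A's loop from a state corresponding to the open group `cur`
-- equals closing B's remaining group and summing the intersection sizes
lemma loop_eq (lines : List String) (score : Int) (cur : List String) :
    finishA (lines.foldl aStep (score, actOf cur, decide (cur = [])))
    = sumLens (finishB (lines.foldl bStep ([], cur))) score := by
  induction lines generalizing score cur with
  | nil =>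
      by_cases hc : cur = []
      · simp [finishA, finishB, actOf, hc, sumLens]
      · by_cases hp : pvCommon cur = []
        · simp [finishA, finishB, actOf, hc, hp, sumLens, PySem.Set.len]
        · simp [finishA, finishB, actOf, hc, hp, sumLens]
  | cons line rest ih =>
      simp only [List.foldl_cons]
      by_cases hl : line.toList = []
      · by_cases hc : cur = []
        · have ha : aStep (score, actOf cur, decide (cur = [])) line
              = (score + 0, actOf ([] : List String), decide (([] : List String) = [])) := by
            simp [aStep, hl, hc, actOf, PySem.Set.empty, PySem.Set.len]
          have hb : bStep ([], cur) line = (([] : List (List String)), ([] : List String)) := by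
            simp [bStep, hl, hc]
          rw [ha, hb, ih]
          simp
        · have ha : aStep (score, actOf cur, decide (cur = [])) line
              = (score + PySem.Set.len (pvCommon cur), actOf ([] : List String),
                 decide (([] : List String) = [])) := by
            simp [aStep, hl, hc, actOf]
          have hb : bStep ([], cur) line = ([cur], ([] : List String)) := by
            simp [bStep, hl, hc]
          rw [ha, hb, ih, bfold_factor rest [cur] []]
          by_cases he : (rest.foldl bStep ([], ([] : List String))).2 = []
          · simp [finishB, he, sumLens, pvCommon]
          · simp only [finishB, he, ne_eq, not_false_iff, if_pos, List.append_assoc]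
            rw [sumLens_append]
            simp [sumLens]
      · by_cases hc : cur = []
        · have ha : aStep (score, actOf cur, decide (cur = [])) line
              = (score, actOf [line], decide (([line] : List String) = [])) := by
            simp [aStep, hl, hc, actOf, pvCommon]
          have hb : bStep ([], cur) line = (([] : List (List String)), [line]) := by
            simp [bStep, hl, hc]
          rw [ha, hb, ih]
        · have ha : aStep (score, actOf cur, decide (cur = [])) line
              = (score, actOf (cur ++ [line]), decide ((cur ++ [line]) = [])) := by
            simp [aStep, hl, hc, actOf, pvCommon_append cur line hc]
          have hb : bStep ([], cur) line = (([] : List (List String)), cur ++ [line]) := by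
            simp [bStep, hl]
          rw [ha, hb, ih]

theorem part_two_eq_alt (p : List String) : part_two p = part_two_alt p := by
  have h := loop_eq p 0 []
  simpa [part_two, part_two_alt, pvGroups, finishA, finishB, actOf, sumLens] using h

-- ===== VERDICT (by name: the statement is the Claim_ definition above) =====
theorem part_two_spec : Claim_equal_part_two := by
  intro p _
  unfold Spec_part_two
  exact part_two_eq_alt p
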